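-- pv_equiv track=rewrite | github.com/vavilovnv/python_ex | Test tasks (unsorted)/Solutions/leetcode/2027-Minimum-moves-to-convert-string.py | minimumMoves
-- ===== SOURCE A (Python) =====
-- def minimumMoves(s: str) -> int:
--     res = i = 0
--     while i < len(s):
--         if s[i] == 'X':
--             res += 1
--             i += 3
--         else:
--             i += 1
--     return res
-- ===== SOURCE B (Python) =====
-- def minimumMoves(s: str) -> int:
--     # Dynamic programming over suffixes, built back to front:
--     # dp[0] is the answer for the current suffix; dp[k] for the suffix k further right.
--     dp = [0, 0, 0]
--     for c in reversed(s):
--         dp = [1 + dp[2] if c == 'X' else dp[0]] + dp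
--     return dp[0]
-- ===== Notes on version B (the rewrite author's own statement) =====
-- stated objective: alternative
-- what changed: Replaces the greedy forward jump scan with right-to-left dynamic programming over suffixes: a dp list built back to front with dp[i] = dp[i+1] if s[i] != 'X' else 1 + dp[i+3], returning dp[0].
import Mathlib
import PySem

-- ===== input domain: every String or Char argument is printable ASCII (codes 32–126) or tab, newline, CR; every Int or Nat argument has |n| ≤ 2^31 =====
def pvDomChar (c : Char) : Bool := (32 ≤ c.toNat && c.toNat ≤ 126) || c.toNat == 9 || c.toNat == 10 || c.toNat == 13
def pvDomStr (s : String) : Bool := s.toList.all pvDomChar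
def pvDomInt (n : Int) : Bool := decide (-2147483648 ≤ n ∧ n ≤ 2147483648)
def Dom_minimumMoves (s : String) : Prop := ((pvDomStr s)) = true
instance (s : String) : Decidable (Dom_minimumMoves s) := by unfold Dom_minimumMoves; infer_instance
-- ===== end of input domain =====

-- B replaces A's greedy forward jump scan with right-to-left dynamic programming over
-- suffixes (dp[i] = dp[i+1] or 1 + dp[i+3], built back to front); same value on every string.

-- ===== PORT A =====
-- A's while loop over index i: s[i]=='X' → res += 1, i += 3; else i += 1.
-- Ported as recursion on the suffix of characters from index i (i += 3 = drop 2 of the tail).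
def minimumMovesLoop (cs : List Char) (res : Int) : Int :=
  match cs with
  | [] => res
  | c :: rest => if c = 'X' then minimumMovesLoop (rest.drop 2) (res + 1) else minimumMovesLoop rest res
termination_by cs.length
decreasing_by
  all_goals simp

def minimumMoves (s : String) : Int := minimumMovesLoop s.toList 0

-- ===== PORT B =====
-- Source B's loop body: dp = [1 + dp[2] if c == 'X' else dp[0]] + dp, over reversed(s) = foldr.
-- dp always has length ≥ 3, so Python's dp[0]/dp[2] are total; ported as getD.
def dpStep (c : Char) (dp : List Int) : List Int :=
  (if c = 'X' then 1 + dp.getD 2 0 else dp.getD 0 0) :: dp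

def minimumMoves_alt (s : String) : Int :=
  (s.toList.foldr dpStep [0, 0, 0]).getD 0 0

-- ===== PRECONDITION & SPEC =====
def Spec_minimumMoves (s : String) (out : Int) : Prop := out = minimumMoves_alt s
instance (s : String) (out : Int) : Decidable (Spec_minimumMoves s out) := by unfold Spec_minimumMoves; infer_instance

-- ===== CLAIM (what is proved, stated in full; the proofs are below) =====
def Claim_equal_minimumMoves : Prop := ∀ (s : String), Dom_minimumMoves s → Spec_minimumMoves s (minimumMoves s)

-- ===== LEMMAS AND PROOFS =====

-- A's accumulator is additive.
theorem minimumMovesLoop_acc (cs : List Char) (res : Int) :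
    minimumMovesLoop cs res = res + minimumMovesLoop cs 0 := by
  match cs with
  | [] => simp [minimumMovesLoop]
  | c :: rest =>
    rw [minimumMovesLoop.eq_def]
    conv_rhs => rw [minimumMovesLoop.eq_def]
    by_cases hc : c = 'X'
    · simp only [if_pos hc]
      rw [minimumMovesLoop_acc (rest.drop 2) (res + 1), minimumMovesLoop_acc (rest.drop 2) (0 + 1)]
      ring
    · simp only [if_neg hc]
      exact minimumMovesLoop_acc rest res
termination_by cs.length
decreasing_by all_goals simp

-- The dp list invariant: its first three entries are A's answers for the suffix,
-- the suffix minus one, and the suffix minus two characters.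
theorem dp_inv (cs : List Char) :
    (cs.foldr dpStep [0, 0, 0]).getD 0 0 = minimumMovesLoop cs 0 ∧
    (cs.foldr dpStep [0, 0, 0]).getD 1 0 = minimumMovesLoop (cs.drop 1) 0 ∧
    (cs.foldr dpStep [0, 0, 0]).getD 2 0 = minimumMovesLoop (cs.drop 2) 0 := by
  induction cs with
  | nil => simp [minimumMovesLoop]
  | cons c rest ih =>
    obtain ⟨h0, h1, h2⟩ := ih
    refine ⟨?_, ?_, ?_⟩
    · simp only [List.foldr_cons, dpStep, List.getD_cons_zero]
      rw [minimumMovesLoop.eq_def]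
      by_cases hc : c = 'X'
      · simp only [if_pos hc, h2]
        rw [minimumMovesLoop_acc (rest.drop 2) (0 + 1)]; ring
      · simp only [if_neg hc, h0]
    · simpa [dpStep] using h0
    · simpa [dpStep] using h1

-- ===== VERDICT (by name: the statement is the Claim_ definition above) =====
theorem minimumMoves_spec : Claim_equal_minimumMoves := by
  intro s _
  unfold Spec_minimumMoves minimumMoves minimumMoves_alt
  exact ((dp_inv s.toList).1).symm
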